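-- pv_equiv track=rewrite | github.com/photonized/ITI1120 | Assignments/Assignment 2/Good Copies/a2_300064613_part2.py | oPify
-- ===== SOURCE A (Python) =====
-- def oPify(s):
--     """
--     (str) -> str
--     Returns the OP version of the string provided. Returns a string with the letters o and p between
--     every character of the string. The capitalization of the o and p is dependant on the capitalization of
--     the character that it is next to. If the character is a non alphabet character, there is no oPifying.
--     Preconditions: none
--     """
--     upper = "ABCDEFGHIJKLMNOPQRSTUVWXYZ"
--     lower = upper.lower()
--     a = ""
--
--     for i in range(len(s)):
--         if len(s) > 1 and i < len(s)-1:
--             if (s[i] in upper or s[i] in lower) and (s[i+1] in lower or s[i+1] in upper):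
--                 if s[i] in upper and s[i+1] in upper:
--                     a += s[i]+"OP"
--                 elif s[i] in upper and s[i+1] in lower:
--                     a += s[i]+"Op"
--                 elif s[i] in lower and s[i+1] in upper:
--                     a += s[i]+"oP"
--                 elif s[i] in lower and s[i+1] in lower:
--                     a += s[i]+"op"
--             else:
--                 a += s[i]
--         else:
--             a += s[i]
--     return a
-- ===== SOURCE B (Python) =====
-- def _is_letter(c):
--     return 'A' <= c <= 'Z' or 'a' <= c <= 'z'
--
--
-- def _expand_run(run):
--     # Inside a maximal letter run, every inserted pair is determined locally:
--     # each letter except the last is followed by its own 'O'/'o', and each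
--     # letter except the first is preceded by its own 'P'/'p'.
--     last = len(run) - 1
--     return ''.join(
--         ('' if k == 0 else ('P' if 'A' <= c <= 'Z' else 'p'))
--         + c
--         + ('' if k == last else ('O' if 'A' <= c <= 'Z' else 'o'))
--         for k, c in enumerate(run))
--
--
-- def oPify(s):
--     out = []
--     i, n = 0, len(s)
--     while i < n:
--         if _is_letter(s[i]):
--             j = i + 1
--             while j < n and _is_letter(s[j]):
--                 j += 1
--             out.append(_expand_run(s[i:j]))
--             i = j
--         else:
--             out.append(s[i])
--             i += 1
--     return ''.join(out)
-- ===== Notes on version B (the rewrite author's own statement) =====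
-- stated objective: alternative
-- what changed: Replaces A's per-index pairwise pass (range(len(s)) with a boundary guard and a four-way elif chain over 26-letter alphabet strings) by a run-based algorithm: scan the string into maximal ASCII-letter runs, copy non-letters through, and expand each run locally with each letter independently contributing a 'P'/'p' prefix (unless first in run) and an 'O'/'o' suffix (unless last in run) from its own case, with no adjacent-pair comparison anywhere.
import Mathlib
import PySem

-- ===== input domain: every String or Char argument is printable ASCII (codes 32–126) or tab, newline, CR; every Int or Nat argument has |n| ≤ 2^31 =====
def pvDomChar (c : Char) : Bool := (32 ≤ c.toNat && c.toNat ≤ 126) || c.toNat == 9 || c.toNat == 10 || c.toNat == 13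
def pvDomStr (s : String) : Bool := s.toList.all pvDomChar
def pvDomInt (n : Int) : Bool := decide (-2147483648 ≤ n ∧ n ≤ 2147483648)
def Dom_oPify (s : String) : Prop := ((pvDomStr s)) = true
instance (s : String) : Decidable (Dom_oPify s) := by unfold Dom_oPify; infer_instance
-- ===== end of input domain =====

-- B replaces A's per-index pairwise pass with a run-based algorithm: split the string into
-- maximal ASCII-letter runs, copy non-letters through, and expand each run with each letter
-- independently contributing a case-matched 'P'/'p' prefix and 'O'/'o' suffix (objective: alternative).

-- ===== PORT A =====
-- the string constants upper / lower = upper.lower(); strings are ported as char lists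
def oPifyUpper : List Char :=
  ['A','B','C','D','E','F','G','H','I','J','K','L','M','N','O','P','Q','R','S','T','U','V','W','X','Y','Z']
def oPifyLower : List Char := PySem.Chars.lower oPifyUpper

def oPify (s : String) : String :=
  let n : Int := PySem.Str.len s
  -- the accumulator a ("" with +=) is built as a List Char and returned via String.ofList
  let a : List Char := (PySem.List.pyRange 0 n 1).foldl (fun a i =>
    if 1 < n ∧ i < n - 1 then
      let ci := (PySem.Str.pyGet? s i).getD ' '        -- s[i]; i is in range for every loop index
      let cj := (PySem.Str.pyGet? s (i + 1)).getD ' '  -- s[i+1]; in range since i < n-1 here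
      if (PySem.Chars.isIn [ci] oPifyUpper || PySem.Chars.isIn [ci] oPifyLower)
          && (PySem.Chars.isIn [cj] oPifyLower || PySem.Chars.isIn [cj] oPifyUpper) then
        if PySem.Chars.isIn [ci] oPifyUpper && PySem.Chars.isIn [cj] oPifyUpper then
          a ++ [ci, 'O', 'P']
        else if PySem.Chars.isIn [ci] oPifyUpper && PySem.Chars.isIn [cj] oPifyLower then
          a ++ [ci, 'O', 'p']
        else if PySem.Chars.isIn [ci] oPifyLower && PySem.Chars.isIn [cj] oPifyUpper then
          a ++ [ci, 'o', 'P']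
        else if PySem.Chars.isIn [ci] oPifyLower && PySem.Chars.isIn [cj] oPifyLower then
          a ++ [ci, 'o', 'p']
        else a                                         -- elif chain with no else: nothing appended
      else a ++ [ci]
    else a ++ [(PySem.Str.pyGet? s i).getD ' ']) []    -- s[i]
  String.ofList a

-- ===== PORT B =====
def oPifyIsLetter (c : Char) : Bool :=  -- _is_letter: 'A' <= c <= 'Z' or 'a' <= c <= 'z'
  (decide ('A' ≤ c) && decide (c ≤ 'Z')) || (decide ('a' ≤ c) && decide (c ≤ 'z'))

-- _expand_run: ''.join over enumerate(run); the joined pieces are built as a List Char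
def oPifyExpandRun (run : List Char) : List Char :=
  let last : Int := (run.length : Int) - 1
  (PySem.List.enumerate run).flatMap (fun kc =>
    (if kc.1 = 0 then []
     else [if decide ('A' ≤ kc.2) && decide (kc.2 ≤ 'Z') then 'P' else 'p'])
    ++ [kc.2]
    ++ (if kc.1 = last then []
        else [if decide ('A' ≤ kc.2) && decide (kc.2 ≤ 'Z') then 'O' else 'o']))

-- the outer while loop over i with the inner while loop advancing j past the run,
-- transliterated as structural recursion: the run s[i:j] is the maximal letter prefix
def oPifyScan : List Char → List Char
  | [] => []
  | c :: t =>
    if oPifyIsLetter c then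
      oPifyExpandRun (c :: t.takeWhile oPifyIsLetter) ++ oPifyScan (t.dropWhile oPifyIsLetter)
    else
      c :: oPifyScan t
termination_by l => l.length
decreasing_by
  · exact Nat.lt_succ_of_le (t.length_dropWhile_le oPifyIsLetter)
  · simp

def oPify_alt (s : String) : String := String.ofList (oPifyScan s.toList)

-- ===== PRECONDITION & SPEC =====
def Spec_oPify (s : String) (out : String) : Prop := out = oPify_alt s
instance (s : String) (out : String) : Decidable (Spec_oPify s out) := by unfold Spec_oPify; infer_instance

-- ===== CLAIM (what is proved, stated in full; the proofs are below) =====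
def Claim_equal_oPify : Prop := ∀ (s : String), Dom_oPify s → Spec_oPify s (oPify s)

-- ===== LEMMAS AND PROOFS =====

def oPifyUp (c : Char) : Bool := decide ('A' ≤ c) && decide (c ≤ 'Z')
def oPifyLow (c : Char) : Bool := decide ('a' ≤ c) && decide (c ≤ 'z')

theorem oPifyIsLetter_eq (c : Char) : oPifyIsLetter c = (oPifyUp c || oPifyLow c) := rfl

-- the lowercase alphabet, computed
theorem oPifyLower_eq : oPifyLower =
    ['a','b','c','d','e','f','g','h','i','j','k','l','m','n','o','p','q','r','s','t','u','v','w','x','y','z'] := by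
  decide

theorem mem_upper (c : Char) : c ∈ oPifyUpper ↔ (65 ≤ c.toNat ∧ c.toNat ≤ 90) := by
  constructor
  · intro h; fin_cases h <;> decide
  · intro ⟨h1, h2⟩
    obtain ⟨n, hn⟩ : ∃ n, c.toNat = n := ⟨_, rfl⟩
    rw [hn] at h1 h2
    have hc : c = Char.ofNat n := by rw [← hn]; exact (Char.ofNat_toNat c).symm
    subst hc
    interval_cases n <;> decide

theorem mem_lower (c : Char) : c ∈ oPifyLower ↔ (97 ≤ c.toNat ∧ c.toNat ≤ 122) := by
  rw [oPifyLower_eq]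
  constructor
  · intro h; fin_cases h <;> decide
  · intro ⟨h1, h2⟩
    obtain ⟨n, hn⟩ : ∃ n, c.toNat = n := ⟨_, rfl⟩
    rw [hn] at h1 h2
    have hc : c = Char.ofNat n := by rw [← hn]; exact (Char.ofNat_toNat c).symm
    subst hc
    interval_cases n <;> decide

theorem toNat_le_iff (c d : Char) : c ≤ d ↔ c.toNat ≤ d.toNat := by
  rw [Char.le_def, UInt32.le_iff_toNat_le]; rfl

theorem isIn_upper (c : Char) : PySem.Chars.isIn [c] oPifyUpper = oPifyUp c := by
  rw [Bool.eq_iff_iff, PySem.Chars.isIn_iff_infix, List.singleton_infix_iff, mem_upper]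
  simp [oPifyUp, toNat_le_iff]

theorem isIn_lower (c : Char) : PySem.Chars.isIn [c] oPifyLower = oPifyLow c := by
  rw [Bool.eq_iff_iff, PySem.Chars.isIn_iff_infix, List.singleton_infix_iff, mem_lower]
  simp [oPifyLow, toNat_le_iff]

-- the canonical per-position output both programs produce
def opSpec : List Char → List Char
  | [] => []
  | [c] => [c]
  | c :: d :: t =>
      (if oPifyIsLetter c && oPifyIsLetter d then
        [c, if oPifyUp c then 'O' else 'o', if oPifyUp d then 'P' else 'p']
      else [c]) ++ opSpec (d :: t)

def opG (l : List Char) (k : Nat) : List Char :=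
  match l[k]?, l[k+1]? with
  | some c, some d =>
      if oPifyIsLetter c && oPifyIsLetter d then
        [c, if oPifyUp c then 'O' else 'o', if oPifyUp d then 'P' else 'p']
      else [c]
  | some c, none => [c]
  | none, _ => []

theorem flatMap_opG (l : List Char) : (List.range l.length).flatMap (opG l) = opSpec l := by
  induction l with
  | nil => simp [opSpec]
  | cons c t ih =>
    rw [List.length_cons, List.range_succ_eq_map, List.flatMap_cons, List.flatMap_map]
    have hpt : ∀ k, opG (c :: t) (k + 1) = opG t k := by intro k; simp [opG]
    simp only [Nat.succ_eq_add_one, hpt, ih]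
    cases t with
    | nil => simp [opG, opSpec]
    | cons d t' => simp [opG, opSpec]

theorem oPify_eq_opSpec (s : String) : oPify s = String.ofList (opSpec s.toList) := by
  unfold oPify
  simp only [PySem.Str.len_eq, PySem.List.pyRange_zero_natCast, List.foldl_map]
  congr 1
  rw [PySem.List.foldl_congr_mem (List.range s.toList.length) _
        (fun a k => a ++ opG s.toList k) [] ?_,
      PySem.List.foldl_append_eq_flatMap, flatMap_opG, List.nil_append]
  intro a k hk
  simp only [List.mem_range] at hk
  by_cases hk1 : k + 1 < s.toList.length
  · rw [if_pos (by omega)]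
    have hg1 : PySem.Str.pyGet? s ↑k = some s.toList[k] := by
      rw [PySem.Str.pyGet?_natCast]; exact List.getElem?_eq_getElem (by omega)
    have hg2 : PySem.Str.pyGet? s (↑k + 1) = some s.toList[k + 1] := by
      rw [show ((k : Int) + 1) = ((k + 1 : Nat) : Int) by push_cast; ring,
          PySem.Str.pyGet?_natCast]
      exact List.getElem?_eq_getElem hk1
    rw [hg1, hg2]
    simp only [Option.getD_some, opG, List.getElem?_eq_getElem (by omega : k < s.toList.length),
      List.getElem?_eq_getElem hk1, isIn_upper, isIn_lower]
    rcases hu1 : oPifyUp s.toList[k] <;> rcases hl1 : oPifyLow s.toList[k] <;>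
      rcases hu2 : oPifyUp s.toList[k+1] <;> rcases hl2 : oPifyLow s.toList[k+1] <;>
      simp [oPifyIsLetter_eq, hu1, hl1, hu2, hl2]
  · rw [if_neg (by omega)]
    have hg1 : PySem.Str.pyGet? s ↑k = some s.toList[k] := by
      rw [PySem.Str.pyGet?_natCast]; exact List.getElem?_eq_getElem (by omega)
    simp only [hg1, Option.getD_some, opG, List.getElem?_eq_getElem (by omega : k < s.toList.length),
      List.getElem?_eq_none_iff.mpr (by omega : s.toList.length ≤ k + 1)]

-- B-side characterisation: erAux c l = the expansion of the run c :: l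
def erAux : Char → List Char → List Char
  | c, [] => [c]
  | c, d :: t =>
      [c, if oPifyUp c then 'O' else 'o', if oPifyUp d then 'P' else 'p'] ++ erAux d t

-- the tail of a run expansion, where every element gets its 'P'/'p' prefix
def gAux : Char → List Char → List Char
  | d, [] => [if oPifyUp d then 'P' else 'p', d]
  | d, e :: t =>
      [if oPifyUp d then 'P' else 'p', d, if oPifyUp d then 'O' else 'o'] ++ gAux e t

theorem gAux_eq (t : List Char) : ∀ d, gAux d t = (if oPifyUp d then 'P' else 'p') :: erAux d t := by
  induction t with
  | nil => intro d; simp [gAux, erAux]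
  | cons e t ih => intro d; simp [gAux, erAux, ih]

theorem enum_tail (t : List Char) : ∀ (d : Char) (n : Nat) (L : Int), 1 ≤ n →
    L = (n : Int) + t.length →
    (PySem.List.enumerate (d :: t) (n : Int)).flatMap (fun kc =>
      (if kc.1 = 0 then [] else [if oPifyUp kc.2 then 'P' else 'p'])
      ++ [kc.2]
      ++ (if kc.1 = L then [] else [if oPifyUp kc.2 then 'O' else 'o']))
    = gAux d t := by
  induction t with
  | nil =>
    intro d n L hn hL
    rw [PySem.List.enumerate_cons, PySem.List.enumerate_nil]
    simp only [List.flatMap_cons, List.flatMap_nil, List.append_nil]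
    rw [if_neg (show ¬ ((n : Int) = 0) by omega),
        if_pos (show (n : Int) = L by simp only [List.length_nil, Nat.cast_zero, add_zero] at hL; omega)]
    simp [gAux]
  | cons e t ih =>
    intro d n L hn hL
    rw [PySem.List.enumerate_cons, List.flatMap_cons]
    rw [if_neg (by omega : (n : Int) ≠ 0),
        if_neg (by simp only [List.length_cons] at hL; push_cast at hL ⊢; omega : (n : Int) ≠ L)]
    have hcast : ((n : Int) + 1) = ((n + 1 : Nat) : Int) := by push_cast; ring
    rw [hcast, ih e (n + 1) L (by omega)
      (by simp only [List.length_cons] at hL; push_cast at hL ⊢; omega), gAux]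
    simp

theorem expandRun_eq (c : Char) (l : List Char) : oPifyExpandRun (c :: l) = erAux c l := by
  unfold oPifyExpandRun
  simp only [show ∀ x : Char, (decide ('A' ≤ x) && decide (x ≤ 'Z')) = oPifyUp x from fun _ => rfl]
  rw [PySem.List.enumerate_cons, List.flatMap_cons, if_pos rfl]
  cases l with
  | nil =>
    rw [PySem.List.enumerate_nil]
    simp only [List.flatMap_nil, List.length_cons, List.length_nil]
    norm_num [erAux]
  | cons d t =>
    rw [if_neg (by simp only [List.length_cons]; push_cast; omega :
        (0 : Int) ≠ ((c :: d :: t).length : Int) - 1)]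
    have hstart : ((0 : Int) + 1) = ((1 : Nat) : Int) := by norm_num
    rw [hstart, enum_tail t d 1 (((c :: d :: t).length : Int) - 1) (le_refl 1)
        (by simp only [List.length_cons]; push_cast; ring), gAux_eq, erAux]
    simp

theorem opSpec_cons_notletter (c : Char) (t : List Char) (h : oPifyIsLetter c = false) :
    opSpec (c :: t) = c :: opSpec t := by
  cases t with
  | nil => simp [opSpec]
  | cons d t' => simp [opSpec, h]

theorem spec_run (l : List Char) : ∀ c, oPifyIsLetter c = true →
    opSpec (c :: l) = erAux c (l.takeWhile oPifyIsLetter) ++ opSpec (l.dropWhile oPifyIsLetter) := by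
  induction l with
  | nil => intro c _; simp [opSpec, erAux]
  | cons d t ih =>
    intro c hc
    by_cases hd : oPifyIsLetter d = true
    · rw [List.takeWhile_cons_of_pos hd, List.dropWhile_cons_of_pos hd]
      simp only [opSpec, hc, hd, Bool.and_self, ih d hd, erAux]
      simp
    · simp only [Bool.not_eq_true] at hd
      rw [List.takeWhile_cons_of_neg (by simp [hd]), List.dropWhile_cons_of_neg (by simp [hd])]
      simp [opSpec, hc, hd, erAux]

theorem scan_eq_aux : ∀ (n : Nat) (l : List Char), l.length ≤ n → oPifyScan l = opSpec l := by
  intro n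
  induction n with
  | zero =>
    intro l hl
    have : l = [] := List.eq_nil_of_length_eq_zero (by omega)
    subst this; rw [oPifyScan]; rfl
  | succ n ih =>
    intro l hl
    cases l with
    | nil => rw [oPifyScan]; rfl
    | cons c t =>
      rw [oPifyScan]
      by_cases hc : oPifyIsLetter c = true
      · rw [if_pos hc, expandRun_eq, spec_run t c hc,
          ih (t.dropWhile oPifyIsLetter)
            (le_trans (t.length_dropWhile_le oPifyIsLetter) (by simpa using Nat.lt_succ_iff.mp (by simpa using hl)))]
      · simp only [Bool.not_eq_true] at hc
        rw [if_neg (by simp [hc]), opSpec_cons_notletter c t hc,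
          ih t (by simpa using Nat.lt_succ_iff.mp (by simpa using hl))]

theorem oPify_alt_eq_opSpec (s : String) : oPify_alt s = String.ofList (opSpec s.toList) := by
  unfold oPify_alt
  rw [scan_eq_aux s.toList.length s.toList (le_refl _)]

-- ===== VERDICT (by name: the statement is the Claim_ definition above) =====
theorem oPify_spec : Claim_equal_oPify := by
  intro s _
  unfold Spec_oPify
  rw [oPify_eq_opSpec, oPify_alt_eq_opSpec]
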